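-- pv_equiv track=rewrite | github.com/v-monish-prasad/TimeToEquality | TimeToEquality.py | timeToEquality
-- ===== SOURCE A (Python) =====
-- def timeToEquality(array):
--     if not array:
--         return "Empty Array."
--
--     maximum = array[0]
--     changes = 0
--     totalTime = 0
--
--     for i in range(1, len(array)):
--         if array[i] >= maximum:
--             maximum = array[i]
--
--     for i in range(len(array)):
--         if array[i] < maximum:
--             totalTime += maximum - array[i]
--
--     return totalTime
-- ===== SOURCE B (Python) =====
-- def timeToEquality(array):
--     if not array:
--         return "Empty Array."
--     s = sorted(array)
--     total, prev, k = 0, s[0], 1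
--     for x in s[1:]:
--         total += k * (x - prev)
--         prev, k = x, k + 1
--     return total
-- ===== Notes on version B (the rewrite author's own statement) =====
-- stated objective: alternative
-- what changed: Replaces A's max-scan plus per-element difference loop with a sort-then-sweep: sort the array and accumulate k*(s[k]-s[k-1]) over adjacent sorted pairs (each gap is climbed by the k elements below it).
-- outside the precondition, e.g. on timeToEquality([]): A returns 'Empty Array.', B returns 'Empty Array.'
import Mathlib
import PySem

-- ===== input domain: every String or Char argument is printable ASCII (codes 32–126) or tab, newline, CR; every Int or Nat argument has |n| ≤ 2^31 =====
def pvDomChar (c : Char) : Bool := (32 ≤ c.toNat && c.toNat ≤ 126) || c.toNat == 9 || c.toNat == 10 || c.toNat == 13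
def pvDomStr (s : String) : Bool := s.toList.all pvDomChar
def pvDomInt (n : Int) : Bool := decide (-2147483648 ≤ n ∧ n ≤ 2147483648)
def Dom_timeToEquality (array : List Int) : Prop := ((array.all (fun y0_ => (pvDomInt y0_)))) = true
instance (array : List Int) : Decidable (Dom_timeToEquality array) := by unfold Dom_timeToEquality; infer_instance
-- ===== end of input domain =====

-- B replaces A's max-scan + difference loop with sort-then-sweep over adjacent sorted gaps (alternative algorithm; for [] both return the string "Empty Array.", outside the Int return type, hence excluded by Pre_).


-- ===== PORT A =====
def timeToEquality (array : List Int) : Int :=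
  match array with
  | [] => 0  -- unreachable under Pre_: Python returns the string "Empty Array." here
  | h :: t =>
    -- maximum = array[0]; for i in range(1, len(array)): if array[i] >= maximum: maximum = array[i]
    let maximum := t.foldl (fun m x => if x ≥ m then x else m) h
    -- totalTime = 0; for i in range(len(array)): if array[i] < maximum: totalTime += maximum - array[i]
    (h :: t).foldl (fun acc x => if x < maximum then acc + (maximum - x) else acc) 0

-- ===== PORT B =====
-- for x in s[1:]: total += k * (x - prev); prev, k = x, k + 1
def teLoop : List Int → Int → Int → Int → Int
  | [], total, _, _ => total
  | x :: rest, total, prev, k => teLoop rest (total + k * (x - prev)) x (k + 1)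

def timeToEquality_alt (array : List Int) : Int :=
  match PySem.List.sorted array (fun x => x) false with
  | [] => 0  -- unreachable under Pre_: Python returns "Empty Array." before sorting
  | h :: t => teLoop t 0 h 1   -- total, prev, k = 0, s[0], 1

-- ===== PRECONDITION & SPEC =====
-- Pre_ excludes only the empty list: there A returns the string "Empty Array.", not an Int.
def Pre_timeToEquality (array : List Int) : Prop := array ≠ []
instance (array : List Int) : Decidable (Pre_timeToEquality array) := by unfold Pre_timeToEquality; infer_instance
def pvWitness_timeToEquality : List Int := ([1, 3, 2])
def Spec_timeToEquality (array : List Int) (out : Int) : Prop := out = timeToEquality_alt array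
instance (array : List Int) (out : Int) : Decidable (Spec_timeToEquality array out) := by unfold Spec_timeToEquality; infer_instance

-- ===== CLAIM (what is proved, stated in full; the proofs are below) =====
def Claim_equal_timeToEquality : Prop := ∀ (array : List Int), Dom_timeToEquality array → Pre_timeToEquality array → Spec_timeToEquality array (timeToEquality array)

-- ===== LEMMAS AND PROOFS =====

-- A's maximum-update step is Int max (ties keep either value, both equal).
theorem foldA_eq_foldl_max (t : List Int) (a : Int) :
    t.foldl (fun m x => if x ≥ m then x else m) a = t.foldl max a := by
  induction t generalizing a with
  | nil => rfl
  | cons x t ih =>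
    simp only [List.foldl_cons]
    rw [ih]
    have h1 : (if x ≥ a then x else a) = max a x := by simp only [ge_iff_le, max_def]
    rw [h1]

-- A's accumulation loop in closed form, given m dominates the list.
theorem total_closed (xs : List Int) (m : Int) (c : Int) (hm : ∀ x ∈ xs, x ≤ m) :
    xs.foldl (fun acc x => if x < m then acc + (m - x) else acc) c
      = c + m * xs.length - xs.sum := by
  induction xs generalizing c with
  | nil => simp
  | cons x t ih =>
    have hx : x ≤ m := hm x (List.mem_cons_self ..)
    have ht : ∀ y ∈ t, y ≤ m := fun y hy => hm y (List.mem_cons_of_mem _ hy)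
    simp only [List.foldl_cons, List.length_cons, List.sum_cons]
    by_cases h : x < m
    · rw [if_pos h, ih _ ht]; push_cast; ring
    · rw [if_neg h, ih _ ht]
      have : x = m := by omega
      subst this; push_cast; ring

-- B's sweep telescopes to (k + |t|)·last − k·prev − Σt.
theorem teLoop_closed (t : List Int) (c p k : Int) :
    teLoop t c p k = c + (k + t.length) * t.getLastD p - k * p - t.sum := by
  induction t generalizing c p k with
  | nil => simp [teLoop]
  | cons x t ih =>
    simp only [teLoop, List.length_cons, List.sum_cons, List.getLastD_cons]
    rw [ih]
    push_cast; ring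

-- The running max of h :: t is a member of h :: t.
theorem foldl_max_mem (t : List Int) (h : Int) : t.foldl max h ∈ h :: t := by
  induction t generalizing h with
  | nil => simp
  | cons x t ih =>
    simp only [List.foldl_cons]
    rcases max_choice h x with he | he <;> rw [he]
    · rcases List.mem_cons.mp (ih h) with hm | hm
      · rw [hm]; simp
      · simp [hm]
    · rcases List.mem_cons.mp (ih x) with hm | hm
      · rw [hm]; simp
      · simp [hm]

-- The last element (default h) of t is a member of h :: t.
theorem getLastD_mem (t : List Int) (h : Int) : t.getLastD h ∈ h :: t := by
  induction t generalizing h with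
  | nil => simp
  | cons x t ih =>
    rw [List.getLastD_cons]
    rcases List.mem_cons.mp (ih x) with hm | hm
    · rw [hm]; simp
    · exact List.mem_cons_of_mem _ (List.mem_cons_of_mem _ hm)

-- In a ≤-sorted nonempty list, the last element dominates every element.
theorem pairwise_getLastD_isMax (t : List Int) (h : Int)
    (hp : (h :: t).Pairwise (· ≤ ·)) : ∀ y ∈ h :: t, y ≤ t.getLastD h := by
  induction t generalizing h with
  | nil => intro y hy; simp at hy; simp [hy]
  | cons x t ih =>
    rcases List.pairwise_cons.mp hp with ⟨hb, hp'⟩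
    intro y hy
    simp only [List.getLastD_cons]
    rcases List.mem_cons.mp hy with rfl | hy'
    · calc y ≤ x := hb x (List.mem_cons_self ..)
        _ ≤ t.getLastD x := ih x hp' x (List.mem_cons_self ..)
    · exact ih x hp' y hy'

-- ===== VERDICT (by name: the statement is the Claim_ definition above) =====
theorem timeToEquality_spec : Claim_equal_timeToEquality := by
  intro array _ hpre
  unfold Spec_timeToEquality
  match harr : array with
  | [] => exact absurd rfl hpre
  | h :: t =>
    -- the sorted list is nonempty
    obtain ⟨h', t', hs⟩ : ∃ h' t', PySem.List.sorted (h :: t) (fun x => x) false = h' :: t' := by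
      rcases he : PySem.List.sorted (h :: t) (fun x => x) false with _ | ⟨h', t'⟩
      · have hp := PySem.List.sorted_perm (h :: t) (fun x => x) false
        rw [he] at hp
        exact absurd hp.symm.eq_nil (by simp)
      · exact ⟨h', t', rfl⟩
    have hperm : (h' :: t').Perm (h :: t) := hs ▸ PySem.List.sorted_perm (h :: t) (fun x => x) false
    have hpw : (h' :: t').Pairwise (· ≤ ·) := by
      have := PySem.List.sorted_pairwise (xs := h :: t) (key := fun x => x)
      rw [hs] at this; exact this
    -- A's maximum and B's sorted-last are equal (both are THE maximum)
    set M := t.foldl max h with hM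
    set L := t'.getLastD h' with hL
    have hMmem : M ∈ h :: t := foldl_max_mem t h
    have hLmem : L ∈ h :: t := hperm.mem_iff.mp (getLastD_mem t' h')
    have hMub : ∀ y ∈ h :: t, y ≤ M := by
      intro y hy
      rcases List.mem_cons.mp hy with rfl | hy'
      · exact (PySem.List.le_foldl_max t y).1
      · exact (PySem.List.le_foldl_max t h).2 y hy'
    have hLub : ∀ y ∈ h :: t, y ≤ L := fun y hy =>
      pairwise_getLastD_isMax t' h' hpw y (hperm.mem_iff.mpr hy)
    have hML : M = L := le_antisymm (hLub M hMmem) (hMub L hLmem)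
    -- close both sides
    show timeToEquality (h :: t) = timeToEquality_alt (h :: t)
    have hA : timeToEquality (h :: t) = M * (h :: t).length - (h :: t).sum := by
      simp only [timeToEquality, foldA_eq_foldl_max, ← hM]
      rw [total_closed (h :: t) M 0 hMub]; ring
    have hB : timeToEquality_alt (h :: t) = (1 + (t' : List Int).length) * L - (h' :: t').sum := by
      simp only [timeToEquality_alt, hs, teLoop_closed, ← hL, List.sum_cons]; ring
    rw [hA, hB, hML, ← hperm.length_eq, hperm.sum_eq]
    simp only [List.length_cons]
    push_cast; ring
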